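-- pv_equiv track=rewrite | github.com/rahulgupta2018/ai-code-review-multi-agent | tests/test_dynamic_enhanced_report.py | _format_findings_by_file
-- ===== SOURCE A (Python) =====
-- from typing import List, Dict, Any
--
-- def _format_findings_by_file(findings: List[Dict[str, Any]]) -> str:
--     """Format findings grouped by file"""
--     files_findings = {}
--     for finding in findings:
--         file_name = finding.get('file_name', 'unknown')
--         if file_name not in files_findings:
--             files_findings[file_name] = []
--         files_findings[file_name].append(finding)
--
--     formatted = []
--     for file_name, file_findings in files_findings.items():
--         formatted.append(f"### {file_name} ({len(file_findings)} issues)")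
--         for i, finding in enumerate(file_findings, 1):
--             formatted.append(f"{i}. **{finding.get('description', 'Issue detected')}**")
--             formatted.append(f"   - Line: {finding.get('line', 'N/A')}")
--             formatted.append(f"   - Severity: {finding.get('severity', 'UNKNOWN')}")
--             formatted.append(f"   - Category: {finding.get('category', 'general')}")
--             if finding.get('recommendation'):
--                 formatted.append(f"   - Recommendation: {finding['recommendation']}")
--             formatted.append("")
--
--     return '\n'.join(formatted)
-- ===== SOURCE B (Python) =====
-- from typing import List, Dict, Any
--
-- def _format_finding(i, finding):
--     block = [
--         f"{i}. **{finding.get('description', 'Issue detected')}**",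
--         f"   - Line: {finding.get('line', 'N/A')}",
--         f"   - Severity: {finding.get('severity', 'UNKNOWN')}",
--         f"   - Category: {finding.get('category', 'general')}",
--     ]
--     if finding.get('recommendation'):
--         block.append(f"   - Recommendation: {finding['recommendation']}")
--     block.append("")
--     return block
--
-- def _format_group(name, group):
--     return [f"### {name} ({len(group)} issues)"] + [
--         line for i, f in enumerate(group, 1) for line in _format_finding(i, f)
--     ]
--
-- def _format_findings_by_file(findings: List[Dict[str, Any]]) -> str:
--     names = dict.fromkeys(f.get('file_name', 'unknown') for f in findings)
--     return '\n'.join(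
--         line
--         for name in names
--         for line in _format_group(name, [f for f in findings
--                                          if f.get('file_name', 'unknown') == name])
--     )
-- ===== Notes on version B (the rewrite author's own statement) =====
-- stated objective: alternative
-- what changed: Replaces A's single-pass dict-of-lists grouping followed by line-by-line appends with a names-first strategy: collect the distinct file names in first-appearance order, then for each name rescan the findings list with a filter and emit its whole block via flat comprehensions.
import Mathlib
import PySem

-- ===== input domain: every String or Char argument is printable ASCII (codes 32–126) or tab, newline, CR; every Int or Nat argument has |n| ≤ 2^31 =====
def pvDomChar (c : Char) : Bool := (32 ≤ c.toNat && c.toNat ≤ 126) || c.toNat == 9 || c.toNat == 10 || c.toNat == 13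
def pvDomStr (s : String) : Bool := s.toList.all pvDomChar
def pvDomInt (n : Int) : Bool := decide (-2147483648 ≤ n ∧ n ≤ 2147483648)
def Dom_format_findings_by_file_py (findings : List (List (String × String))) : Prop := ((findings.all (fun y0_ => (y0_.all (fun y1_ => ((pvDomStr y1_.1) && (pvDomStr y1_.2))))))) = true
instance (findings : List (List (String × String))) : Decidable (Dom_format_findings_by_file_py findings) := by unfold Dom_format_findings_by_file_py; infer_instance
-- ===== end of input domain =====

-- B iterates the distinct file names (first-appearance order) and rescans the findings list per name,
-- instead of A's single-pass dict grouping; same output, proved equal.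

-- finding.get(k, dflt) on an association-list dict (first match wins)
def pyGetS (f : List (String × String)) (k dflt : String) : String :=
  (PySem.Dict.mk f).getD k dflt

-- ===== PORT A =====
def format_findings_by_file_py (findings : List (List (String × String))) : String :=
  let files := findings.foldl (fun d f =>
      let name := pyGetS f "file_name" "unknown"
      let d := if d.contains name then d else d.insert name ([] : List (List (String × String)))
      d.modify name [] (fun l => l ++ [f])) PySem.Dict.empty
  let formatted := files.items.foldl (fun acc p =>
      let acc := acc ++ ["### " ++ p.1 ++ " (" ++ PySem.Int.toStr (p.2.length : Int) ++ " issues)"]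
      (PySem.List.enumerate p.2 1).foldl (fun acc e =>
        let acc := acc ++ [PySem.Int.toStr e.1 ++ ". **" ++ pyGetS e.2 "description" "Issue detected" ++ "**"]
        let acc := acc ++ ["   - Line: " ++ pyGetS e.2 "line" "N/A"]
        let acc := acc ++ ["   - Severity: " ++ pyGetS e.2 "severity" "UNKNOWN"]
        let acc := acc ++ ["   - Category: " ++ pyGetS e.2 "category" "general"]
        let acc := match (PySem.Dict.mk e.2).get? "recommendation" with
          | some r => if r ≠ "" then acc ++ ["   - Recommendation: " ++ r] else acc
          | none => acc
        acc ++ [""]) acc) ([] : List String)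
  PySem.Str.join "\n" formatted

-- ===== PORT B =====
def pvFindingBlock (i : Int) (f : List (String × String)) : List String :=
  let block := [PySem.Int.toStr i ++ ". **" ++ pyGetS f "description" "Issue detected" ++ "**",
                "   - Line: " ++ pyGetS f "line" "N/A",
                "   - Severity: " ++ pyGetS f "severity" "UNKNOWN",
                "   - Category: " ++ pyGetS f "category" "general"]
  let block := match (PySem.Dict.mk f).get? "recommendation" with
    | some r => if r ≠ "" then block ++ ["   - Recommendation: " ++ r] else block
    | none => block
  block ++ [""]

def pvFormatGroup (name : String) (group : List (List (String × String))) : List String :=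
  ("### " ++ name ++ " (" ++ PySem.Int.toStr (group.length : Int) ++ " issues)") ::
    (PySem.List.enumerate group 1).flatMap (fun e => pvFindingBlock e.1 e.2)

def format_findings_by_file_py_alt (findings : List (List (String × String))) : String :=
  let names := PySem.Set.ofList (findings.map (fun f => pyGetS f "file_name" "unknown"))
  PySem.Str.join "\n"
    (names.flatMap (fun name =>
      pvFormatGroup name (findings.filter (fun f => pyGetS f "file_name" "unknown" == name))))

-- ===== PRECONDITION & SPEC =====
def Spec_format_findings_by_file_py (findings : List (List (String × String))) (out : String) : Prop := out = format_findings_by_file_py_alt findings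
instance (findings : List (List (String × String))) (out : String) : Decidable (Spec_format_findings_by_file_py findings out) := by unfold Spec_format_findings_by_file_py; infer_instance

-- ===== CLAIM (what is proved, stated in full; the proofs are below) =====
def Claim_equal_format_findings_by_file_py : Prop := ∀ (findings : List (List (String × String))), Dom_format_findings_by_file_py findings → Spec_format_findings_by_file_py findings (format_findings_by_file_py findings)


-- ===== LEMMAS AND PROOFS =====

-- A's grouping-loop body ('ensure key, then append') is one modify
theorem pv_step (d : PySem.Dict String (List (List (String × String)))) (k : String)
    (f : List (String × String)) :
    (if d.contains k then d else d.insert k ([] : List (List (String × String)))).modify k []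
        (fun l => l ++ [f])
      = d.modify k [] (fun l => l ++ [f]) := by
  by_cases h : d.contains k = true
  · simp [h]
  · have h' : d.contains k = false := by simpa using h
    simp [h', PySem.Dict.modify, PySem.Dict.getD_insert_self, PySem.Dict.insert_insert_self,
          PySem.Dict.getD_of_not_contains d ([] : List (List (String × String))) h']

-- the dict built by A's first loop, as (name, filtered findings) pairs in first-appearance order
theorem pv_files_items (findings : List (List (String × String))) :
    (findings.foldl
        (fun d f => d.modify (pyGetS f "file_name" "unknown") [] (fun l => l ++ [f]))
        PySem.Dict.empty).items
    = (PySem.Set.ofList (findings.map (fun f => pyGetS f "file_name" "unknown"))).map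
        (fun n => (n, findings.filter (fun f => pyGetS f "file_name" "unknown" == n))) := by
  have hnd : (findings.foldl
      (fun d f => d.modify (pyGetS f "file_name" "unknown") [] (fun l => l ++ [f]))
      (PySem.Dict.empty : PySem.Dict String (List (List (String × String))))).keys.Nodup := by
    apply PySem.Dict.nodup_keys_foldl_modify_key
    simp [PySem.Dict.keys_empty]
  rw [PySem.Dict.items_eq_map_keys _ hnd ([] : List (List (String × String)))]
  have hkeys : (findings.foldl
      (fun d f => d.modify (pyGetS f "file_name" "unknown") [] (fun l => l ++ [f]))
      (PySem.Dict.empty : PySem.Dict String (List (List (String × String))))).keys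
      = PySem.Set.ofList (findings.map (fun f => pyGetS f "file_name" "unknown")) := by
    rw [PySem.Dict.keys_foldl_modify_key]
    simp [PySem.Dict.keys_empty, PySem.Set.update_nil_left]
  rw [hkeys]
  apply List.map_congr_left
  intro n _
  have hpair : findings.foldl
      (fun d f => d.modify (pyGetS f "file_name" "unknown") [] (fun l => l ++ [f]))
      (PySem.Dict.empty : PySem.Dict String (List (List (String × String))))
      = (findings.map (fun f => (pyGetS f "file_name" "unknown", f))).foldl
          (fun d p => d.modify p.1 [] (fun l => l ++ [p.2])) PySem.Dict.empty := by
    rw [List.foldl_map]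
  rw [hpair, PySem.Dict.getD_foldl_modify_append]
  simp [PySem.Dict.getD_empty, List.filter_map, Function.comp_def, List.map_map]

-- A's per-finding appends equal B's block
theorem pv_stepA (acc : List String) (e : Int × List (String × String)) :
    (let acc := acc ++ [PySem.Int.toStr e.1 ++ ". **" ++ pyGetS e.2 "description" "Issue detected" ++ "**"]
     let acc := acc ++ ["   - Line: " ++ pyGetS e.2 "line" "N/A"]
     let acc := acc ++ ["   - Severity: " ++ pyGetS e.2 "severity" "UNKNOWN"]
     let acc := acc ++ ["   - Category: " ++ pyGetS e.2 "category" "general"]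
     let acc := match (PySem.Dict.mk e.2).get? "recommendation" with
       | some r => if r ≠ "" then acc ++ ["   - Recommendation: " ++ r] else acc
       | none => acc
     acc ++ [""])
    = acc ++ pvFindingBlock e.1 e.2 := by
  unfold pvFindingBlock
  cases h : (PySem.Dict.mk e.2).get? "recommendation" with
  | none => simp
  | some r => by_cases hr : r = "" <;> simp [hr]

-- A's per-file section equals B's group
theorem pv_body (acc : List String) (p : String × List (List (String × String))) :
    (PySem.List.enumerate p.2 1).foldl (fun acc e =>
        (let acc := acc ++ [PySem.Int.toStr e.1 ++ ". **" ++ pyGetS e.2 "description" "Issue detected" ++ "**"]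
         let acc := acc ++ ["   - Line: " ++ pyGetS e.2 "line" "N/A"]
         let acc := acc ++ ["   - Severity: " ++ pyGetS e.2 "severity" "UNKNOWN"]
         let acc := acc ++ ["   - Category: " ++ pyGetS e.2 "category" "general"]
         let acc := match (PySem.Dict.mk e.2).get? "recommendation" with
           | some r => if r ≠ "" then acc ++ ["   - Recommendation: " ++ r] else acc
           | none => acc
         acc ++ [""]))
      (acc ++ ["### " ++ p.1 ++ " (" ++ PySem.Int.toStr (p.2.length : Int) ++ " issues)"])
    = acc ++ pvFormatGroup p.1 p.2 := by
  simp only [pv_stepA]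
  rw [PySem.List.foldl_append_eq_flatMap]
  simp [pvFormatGroup]

theorem pv_main : ∀ (findings : List (List (String × String))),
    format_findings_by_file_py findings = format_findings_by_file_py_alt findings := by
  intro findings
  simp only [format_findings_by_file_py, format_findings_by_file_py_alt]
  simp only [pv_step, pv_files_items, pv_body, PySem.List.foldl_append_eq_flatMap]
  simp [List.flatMap_map]

-- ===== VERDICT (by name: the statement is the Claim_ definition above) =====
theorem format_findings_by_file_py_spec : Claim_equal_format_findings_by_file_py := by
  intro findings _
  unfold Spec_format_findings_by_file_py
  exact pv_main findings
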